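-- pv_equiv track=rewrite | github.com/ayoubzulfiqar/Leetcode-Medium | MaximumNumberofPotholesThatCanBeFixed/maximum_number_of_potholes_that_can_be_fixed.py | max_potholes_fixed
-- ===== SOURCE A (Python) =====
-- def max_potholes_fixed(potholes, budget):
--     potholes.sort()
--     fixed_count = 0
--     current_budget = budget
--     for pothole_size in potholes:
--         if current_budget >= pothole_size:
--             current_budget -= pothole_size
--             fixed_count += 1
--         else:
--             break
--     return fixed_count
-- ===== SOURCE B (Python) =====
-- def max_potholes_fixed(potholes, budget):
--     # Selection-based greedy: repeatedly extract the minimum remaining pothole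
--     # until it no longer fits in the budget. No sorting at all.
--     # (Unlike the original, this does NOT sort `potholes` in place; return value only.)
--     remaining = list(potholes)
--     count = 0
--     while remaining:
--         m = min(remaining)
--         if m > budget:
--             break
--         budget -= m
--         count += 1
--         remaining.remove(m)
--     return count
-- ===== Notes on version B (the rewrite author's own statement) =====
-- stated objective: alternative
-- what changed: Replaces sort-then-scan-with-running-budget by selection-based greedy: repeatedly take min() of the remaining potholes and remove it until the minimum exceeds the budget, with no sorting; note B does not mutate the argument while A sorts it in place.
import Mathlib
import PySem

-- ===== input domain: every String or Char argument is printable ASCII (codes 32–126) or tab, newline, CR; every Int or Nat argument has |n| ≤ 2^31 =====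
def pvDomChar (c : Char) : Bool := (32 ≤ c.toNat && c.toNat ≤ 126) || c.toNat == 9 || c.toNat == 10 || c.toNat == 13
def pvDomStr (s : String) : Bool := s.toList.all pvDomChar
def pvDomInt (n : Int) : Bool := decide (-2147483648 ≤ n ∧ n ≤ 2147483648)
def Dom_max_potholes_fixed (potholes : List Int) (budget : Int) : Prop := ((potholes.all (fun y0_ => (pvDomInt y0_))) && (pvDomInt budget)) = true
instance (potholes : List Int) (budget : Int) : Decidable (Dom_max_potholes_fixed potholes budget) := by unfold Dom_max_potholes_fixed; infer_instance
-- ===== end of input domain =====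

-- B replaces A's sort-then-scan (sort in place, subtract from a running budget, break) by a
-- selection-based greedy: repeatedly take the minimum of the remaining potholes and remove it
-- until it no longer fits the budget; no sorting at all (alternative decomposition, same results).
-- A sorts its argument in place and B does not: the equivalence proved here is about the RETURN value only.


-- ===== PORT A =====
-- A's for-loop with break: running budget and fixed_count, stop at first unaffordable pothole.
def pvLoopA : List Int → Int → Int → Int
  | [], _, fixed_count => fixed_count
  | p :: ps, current_budget, fixed_count =>
      if current_budget ≥ p then pvLoopA ps (current_budget - p) (fixed_count + 1)
      else fixed_count

def max_potholes_fixed (potholes : List Int) (budget : Int) : Int :=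
  pvLoopA (PySem.List.sorted potholes (fun x => x)) budget 0

-- ===== PORT B =====
-- B's while-loop: while the remaining list is nonempty take its minimum (min? = none exactly
-- when the list is empty, i.e. the while test fails); remaining.remove(m) is PySem.List.remove?
-- (its none branch is Python's ValueError, unreachable here since m ∈ remaining).
def pvLoopB (remaining : List Int) (budget count : Int) : Int :=
  match hm : PySem.List.min? remaining (fun v => v) with
  | none => count
  | some m =>
      if m > budget then count
      else
        match hr : PySem.List.remove? remaining m with
        | none => count
        | some rest => pvLoopB rest (budget - m) (count + 1)
termination_by remaining.length
decreasing_by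
  have hmem : m ∈ remaining := PySem.List.min?_mem hm
  rw [PySem.List.remove?_eq_some_erase remaining m hmem] at hr
  cases hr
  rw [List.length_erase_of_mem hmem]
  exact Nat.sub_lt (List.length_pos_of_mem hmem) one_pos

def max_potholes_fixed_alt (potholes : List Int) (budget : Int) : Int :=
  pvLoopB potholes budget 0

-- ===== PRECONDITION & SPEC =====
def Spec_max_potholes_fixed (potholes : List Int) (budget : Int) (out : Int) : Prop := out = max_potholes_fixed_alt potholes budget
instance (potholes : List Int) (budget : Int) (out : Int) : Decidable (Spec_max_potholes_fixed potholes budget out) := by unfold Spec_max_potholes_fixed; infer_instance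

-- ===== CLAIM (what is proved, stated in full; the proofs are below) =====
def Claim_equal_max_potholes_fixed : Prop := ∀ (potholes : List Int) (budget : Int), Dom_max_potholes_fixed potholes budget → Spec_max_potholes_fixed potholes budget (max_potholes_fixed potholes budget)

-- ===== LEMMAS AND PROOFS =====

-- Unfolding lemmas for B's well-founded loop.
theorem pvLoopB_nil (b c : Int) : pvLoopB [] b c = c := by
  unfold pvLoopB
  simp [PySem.List.min?]

theorem pvLoopB_some (l : List Int) (m b c : Int)
    (hm : PySem.List.min? l (fun v => v) = some m) :
    pvLoopB l b c = if m > b then c else pvLoopB (l.erase m) (b - m) (c + 1) := by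
  have hmem : m ∈ l := PySem.List.min?_mem hm
  conv_lhs => unfold pvLoopB
  split
  · rename_i h; rw [h] at hm; cases hm
  · rename_i m2 h
    rw [h] at hm
    injection hm with e
    subst e
    by_cases hb : m2 > b
    · rw [if_pos (by omega : b < m2), if_pos hb]
    · rw [if_neg (by omega : ¬ b < m2), if_neg hb]
      split
      · rename_i h2; rw [PySem.List.remove?_eq_some_erase l m2 hmem] at h2; cases h2
      · rename_i rest h2
        rw [PySem.List.remove?_eq_some_erase l m2 hmem] at h2
        injection h2 with e2
        rw [e2]

-- Pulling the minimum to the front: sorted l = min l :: sorted (l.erase (min l)).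
theorem sorted_eq_min_cons (l : List Int) (m : Int)
    (hm : PySem.List.min? l (fun v => v) = some m) :
    PySem.List.sorted l (fun x => x) = m :: PySem.List.sorted (l.erase m) (fun x => x) := by
  have hmem : m ∈ l := PySem.List.min?_mem hm
  have hmin : ∀ y ∈ l, m ≤ y := fun y hy => PySem.List.min?_isMin hm y hy
  apply PySem.List.sorted_id_eq_of_perm_of_pairwise
  · exact ((PySem.List.sorted_perm _ _ _).cons m).trans (List.perm_cons_erase hmem).symm
  · refine List.pairwise_cons.mpr ⟨?_, ?_⟩
    · intro y hy
      exact hmin y (l.erase_subset ((PySem.List.mem_sorted _ _ _ _).mp hy))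
    · exact PySem.List.sorted_pairwise _ _

-- Main invariant: B's selection loop equals A's scan over the sorted list.
theorem pvLoopB_eq_loopA (n : Nat) : ∀ (l : List Int), l.length ≤ n → ∀ (b c : Int),
    pvLoopB l b c = pvLoopA (PySem.List.sorted l (fun x => x)) b c := by
  induction n with
  | zero =>
      intro l hl b c
      have h0 : l = [] := List.eq_nil_of_length_eq_zero (Nat.le_zero.mp hl)
      subst h0
      rw [pvLoopB_nil, (PySem.List.sorted_eq_nil_iff _ _ _).mpr rfl]; rfl
  | succ n ih =>
      intro l hl b c
      cases hm : PySem.List.min? l (fun v => v) with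
      | none =>
          have h0 : l = [] := (PySem.List.min?_eq_none_iff _ _).mp hm
          subst h0
          rw [pvLoopB_nil, (PySem.List.sorted_eq_nil_iff _ _ _).mpr rfl]; rfl
      | some m =>
          have hmem : m ∈ l := PySem.List.min?_mem hm
          rw [pvLoopB_some l m b c hm, sorted_eq_min_cons l m hm]
          by_cases hb : m > b
          · rw [if_pos hb]
            simp [pvLoopA, show ¬ b ≥ m by omega]
          · rw [if_neg hb]
            have hlen : (l.erase m).length ≤ n := by
              have := List.length_erase_of_mem hmem
              have := List.length_pos_of_mem hmem
              omega
            rw [ih (l.erase m) hlen (b - m) (c + 1)]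
            simp [pvLoopA, show b ≥ m by omega]

-- ===== VERDICT (by name: the statement is the Claim_ definition above) =====
theorem max_potholes_fixed_spec : Claim_equal_max_potholes_fixed := by
  intro potholes budget _
  unfold Spec_max_potholes_fixed max_potholes_fixed max_potholes_fixed_alt
  exact (pvLoopB_eq_loopA potholes.length potholes (le_refl _) budget 0).symm
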